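-- pv_equiv track=rewrite | github.com/PaolaG365/PythonCourses | PythonFundamentalsMay2023/Text_processing/Exercise/2.Character_multiplier.py | character_multiplier
-- ===== SOURCE A (Python) =====
-- def character_multiplier(string1, string2):
--     total_sum = 0
--     for index in range(len(string1)):
--         if index < len(string2):
--             total_sum += (ord(string1[index]) * ord(string2[index]))
--         else:
--             total_sum += ord(string1[index])
--     return total_sum
-- ===== SOURCE B (Python) =====
-- def character_multiplier(string1, string2):
--     # Arithmetic reformulation: every character of string1 contributes its code
--     # once; a character aligned with string2 contributes ord(a)*ord(b) instead,
--     # i.e. an extra ord(a)*(ord(b)-1). So no per-index branch or tail split.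
--     base = sum(map(ord, string1))
--     correction = sum(ord(a) * (ord(b) - 1) for a, b in zip(string1, string2))
--     return base + correction
-- ===== Notes on version B (the rewrite author's own statement) =====
-- stated objective: alternative
-- what changed: Replaces A's branching indexed loop by an arithmetic identity: sum all character codes of string1 once, then add a correction ord(a)*(ord(b)-1) over the zipped overlap, so neither a per-index branch nor a prefix/tail split exists.
import Mathlib
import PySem

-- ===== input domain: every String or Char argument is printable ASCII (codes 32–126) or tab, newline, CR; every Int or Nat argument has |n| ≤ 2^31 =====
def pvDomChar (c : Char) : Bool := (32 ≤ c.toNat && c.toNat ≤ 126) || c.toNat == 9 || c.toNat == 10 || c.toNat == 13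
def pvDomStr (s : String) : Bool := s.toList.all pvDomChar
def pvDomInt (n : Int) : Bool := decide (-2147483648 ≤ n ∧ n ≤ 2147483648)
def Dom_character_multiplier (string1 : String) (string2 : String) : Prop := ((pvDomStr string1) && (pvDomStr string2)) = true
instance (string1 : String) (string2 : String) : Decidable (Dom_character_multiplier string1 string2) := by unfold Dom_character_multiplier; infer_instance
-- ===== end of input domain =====

-- B replaces A's branching indexed loop by an arithmetic identity: sum all codes of string1 once, plus a correction ord(a)*(ord(b)-1) over the zipped overlap.
-- ===== PORT A =====
-- Port of A: loop over range(len(string1)) with a per-index branch.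
def character_multiplier (string1 : String) (string2 : String) : Int :=
  (List.range string1.toList.length).foldl
    (fun total_sum index =>
      if index < string2.toList.length then
        total_sum + ((string1.toList.getD index ' ').toNat : Int) * ((string2.toList.getD index ' ').toNat : Int)
      else
        total_sum + ((string1.toList.getD index ' ').toNat : Int)) 0

-- ===== PORT B =====
-- Port of B: base sum of all of string1's codes, plus correction over the zip.
def character_multiplier_alt (string1 : String) (string2 : String) : Int :=
  let base : Int := (string1.toList.map (fun c => ((c.toNat : Int)))).sum
  let correction : Int := ((string1.toList.zip string2.toList).map
    (fun p => ((p.1.toNat : Int) * ((p.2.toNat : Int) - 1)))).sum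
  base + correction

-- ===== PRECONDITION & SPEC =====
def Spec_character_multiplier (string1 : String) (string2 : String) (out : Int) : Prop := out = character_multiplier_alt string1 string2
instance (string1 : String) (string2 : String) (out : Int) : Decidable (Spec_character_multiplier string1 string2 out) := by unfold Spec_character_multiplier; infer_instance

-- ===== CLAIM =====
def Claim_equal_character_multiplier : Prop := ∀ (string1 : String) (string2 : String), Dom_character_multiplier string1 string2 → Spec_character_multiplier string1 string2 (character_multiplier string1 string2)

-- ===== LEMMAS AND PROOFS =====
-- a branching accumulation foldl is the sum of the branch-wise mapped list
theorem pv_foldl_add_eq_sum {α : Type} (p : α → Prop) [DecidablePred p] (g h : α → Int) (l : List α) (c : Int) :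
    l.foldl (fun acc x => if p x then acc + g x else acc + h x) c
      = c + (l.map (fun x => if p x then g x else h x)).sum := by
  induction l generalizing c with
  | nil => simp
  | cons a t ih => by_cases hp : p a <;> simp [List.foldl, hp, ih, add_assoc]

theorem pv_key (l1 l2 : List Char) :
    (List.range l1.length).foldl
      (fun total_sum index =>
        if index < l2.length then
          total_sum + ((l1.getD index ' ').toNat : Int) * ((l2.getD index ' ').toNat : Int)
        else
          total_sum + ((l1.getD index ' ').toNat : Int)) 0
    = (l1.map (fun c => ((c.toNat : Int)))).sum
      + ((l1.zip l2).map (fun p => ((p.1.toNat : Int) * ((p.2.toNat : Int) - 1)))).sum := by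
  rw [pv_foldl_add_eq_sum]
  induction l1 generalizing l2 with
  | nil => simp
  | cons c t ih =>
    cases l2 with
    | nil =>
      have := ih ([] : List Char)
      simp only [List.length_nil, Nat.not_lt_zero, if_false, List.length_cons,
        List.range_succ_eq_map, List.map_cons, List.map_map, Function.comp_def,
        List.getD_cons_succ, List.getD_cons_zero, List.zip_nil_right, List.map_nil,
        List.sum_nil, List.sum_cons, zero_add, add_zero] at this ⊢
      omega
    | cons d t2 =>
      have := ih t2
      simp only [List.length_cons, List.range_succ_eq_map, List.map_cons, List.map_map,
        Function.comp_def, Nat.succ_eq_add_one, Nat.add_lt_add_iff_right,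
        List.getD_cons_succ, List.getD_cons_zero, Nat.zero_lt_succ, if_true,
        List.zip_cons_cons, List.sum_cons, zero_add] at this ⊢
      rw [this]
      ring

-- ===== VERDICT =====
theorem character_multiplier_spec : Claim_equal_character_multiplier := by
  intro s1 s2 _
  unfold Spec_character_multiplier character_multiplier character_multiplier_alt
  exact pv_key s1.toList s2.toList
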